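-- pv_equiv track=rewrite | github.com/YigalOrn/Afeka | Course Programming Languages/Python workPlace/תרגילי הגשה 2016/1/Ex_1/Ex_1.py | encrypt3
-- ===== SOURCE A (Python) =====
-- def encrypt3(myStr):
--     lstMystr = list(myStr)
--     i = 0
--     for ch in lstMystr[:] :
--         if ch not in ["a","e","i","o","u"] and ch != ' ':
--             lstMystr.insert(i, ch)
--             i+=2
--         else:
--             i+=1
--     return lstMystr
-- ===== SOURCE B (Python) =====
-- import re
--
-- def encrypt3(myStr):
--     return list(re.sub(r'([^aeiou ])', r'\1\1', myStr))
-- ===== Notes on version B (the rewrite author's own statement) =====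
-- stated objective: faster
-- what changed: Replaces the index-tracking loop that mutates the list with insert() (each insert shifts the tail, O(n^2)) by a single linear regex substitution doubling every character outside [aeiou ], then splitting the result into a char list.
import Mathlib
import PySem

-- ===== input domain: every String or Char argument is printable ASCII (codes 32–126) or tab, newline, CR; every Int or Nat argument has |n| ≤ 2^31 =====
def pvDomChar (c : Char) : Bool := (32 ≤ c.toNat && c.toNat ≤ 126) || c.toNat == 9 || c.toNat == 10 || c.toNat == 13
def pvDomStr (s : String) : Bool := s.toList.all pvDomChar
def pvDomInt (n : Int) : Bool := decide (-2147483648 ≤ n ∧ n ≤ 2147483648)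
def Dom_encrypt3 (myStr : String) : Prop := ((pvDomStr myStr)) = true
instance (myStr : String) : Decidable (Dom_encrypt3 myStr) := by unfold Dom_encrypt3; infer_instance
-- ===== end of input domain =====

-- B replaces A's index-tracking insert() loop by one regex substitution doubling every char outside [aeiou ] (idiomatic, one pass).

-- ===== PORT A =====
-- list(myStr): Python chars are 1-char strings
def pvStep (st : List String × Int) (ch : String) : List String × Int :=
  if ch ∉ (["a","e","i","o","u"] : List String) ∧ ch ≠ " " then
    (PySem.List.insert st.1 st.2 ch, st.2 + 2)
  else
    (st.1, st.2 + 1)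

def encrypt3 (myStr : String) : List String :=
  let lstMystr := myStr.toList.map (fun c => String.ofList [c])
  -- for ch in lstMystr[:] with mutable (lstMystr, i) state
  (lstMystr.foldl pvStep (lstMystr, 0)).1

-- ===== PORT B =====
-- re.sub(r'([^aeiou ])', r'\1\1', myStr): double each char not in the class; list(...) splits back to chars.
def encrypt3_alt (myStr : String) : List String :=
  (myStr.toList.flatMap (fun c =>
    if c ∉ (['a','e','i','o','u',' '] : List Char) then [c, c] else [c])).map
    (fun c => String.ofList [c])

-- ===== PRECONDITION & SPEC =====
def Spec_encrypt3 (myStr : String) (out : List String) : Prop := out = encrypt3_alt myStr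
instance (myStr : String) (out : List String) : Decidable (Spec_encrypt3 myStr out) := by unfold Spec_encrypt3; infer_instance

-- ===== CLAIM (what is proved, stated in full; the proofs are below) =====
def Claim_equal_encrypt3 : Prop := ∀ (myStr : String), Dom_encrypt3 myStr → Spec_encrypt3 myStr (encrypt3 myStr)

-- ===== LEMMAS AND PROOFS =====

def pvDup (ch : String) : List String :=
  if ch ∉ (["a","e","i","o","u"] : List String) ∧ ch ≠ " " then [ch, ch] else [ch]

lemma pvLoop (cs done : List String) :
    (cs.foldl pvStep (done ++ cs, (done.length : Int))).1 = done ++ cs.flatMap pvDup := by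
  induction cs generalizing done with
  | nil => simp
  | cons ch rest ih =>
    simp only [List.foldl_cons, pvStep, List.flatMap_cons]
    by_cases h : ch ∉ (["a","e","i","o","u"] : List String) ∧ ch ≠ " "
    · rw [if_pos h]
      have hins : PySem.List.insert (done ++ ch :: rest) ((done.length : Int)) ch
          = (done ++ [ch, ch]) ++ rest := by
        rw [PySem.List.insert_natCast _ _ _ (by simp)]
        simp
      have := ih (done ++ [ch, ch])
      simp only [hins]
      simp only [List.length_append, List.length_cons, List.length_nil] at this ⊢
      have harith : ((done.length : Int) + 2) = ((done.length + (0 + 1 + 1) : Nat) : Int) := by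
        push_cast; ring
      rw [harith]
      simp only [List.append_assoc, List.cons_append,
        List.nil_append] at this ⊢
      rw [this]
      simp [pvDup, h]
    · rw [if_neg h]
      have := ih (done ++ [ch])
      simp only [List.length_append, List.length_cons, List.length_nil] at this ⊢
      have harith : ((done.length : Int) + 1) = ((done.length + (0 + 1) : Nat) : Int) := by
        push_cast; ring
      rw [harith]
      simp only [List.append_assoc, List.singleton_append] at this
      rw [this]
      simp only [pvDup]
      rw [if_neg h]
      simp

lemma pvDup_singleton (c : Char) :
    pvDup (String.ofList [c])
      = (if c ∉ (['a','e','i','o','u',' '] : List Char) then [c, c] else [c]).map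
          (fun c => String.ofList [c]) := by
  have hmem : (String.ofList [c] ∉ (["a","e","i","o","u"] : List String) ∧
      String.ofList [c] ≠ " ")
      ↔ c ∉ (['a','e','i','o','u',' '] : List Char) := by
    have hsp : (String.ofList [c] = " ") ↔ c = ' ' := by simp [String.ext_iff]
    simp only [List.mem_cons, List.not_mem_nil, or_false, String.ext_iff] at *
    simp only [not_or] at *
    simp
    tauto
  simp only [pvDup]
  by_cases hc : c ∉ (['a','e','i','o','u',' '] : List Char)
  · rw [if_pos (hmem.mpr hc), if_pos hc]; simp
  · rw [if_neg (fun hx => hc (hmem.mp hx)), if_neg hc]; simp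

-- ===== VERDICT (by name: the statement is the Claim_ definition above) =====
theorem encrypt3_spec : Claim_equal_encrypt3 := by
  intro myStr _
  unfold Spec_encrypt3 encrypt3 encrypt3_alt
  show (List.foldl pvStep (myStr.toList.map (fun c => String.ofList [c]), 0)
      (myStr.toList.map (fun c => String.ofList [c]))).1 = _
  have := pvLoop (myStr.toList.map (fun c => String.ofList [c])) []
  simp only [List.nil_append, List.length_nil, Nat.cast_zero] at this
  rw [this, List.flatMap_map, List.map_flatMap]
  congr 1
  funext c
  exact pvDup_singleton c
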